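-- pv_equiv track=rewrite | github.com/Hexa08/NEF2 | nef2/tensor.py | _broadcast_pos
-- ===== SOURCE A (Python) =====
-- def _strides(shape):
--     stride = 1
--     out = []
--     for size in reversed(shape):
--         out.append(stride)
--         stride *= size
--     return tuple(reversed(out))
--
-- def _index_to_flat(index, shape):
--     return sum(i * s for i, s in zip(index, _strides(shape)))
--
-- def _broadcast_pos(index, src_shape, out_shape):
--     if src_shape == out_shape:
--         return _index_to_flat(index, src_shape)
--     pad = len(out_shape) - len(src_shape)
--     src_index = []
--     for i, size in enumerate(src_shape):
--         src_index.append(0 if size == 1 else index[i + pad])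
--     return _index_to_flat(tuple(src_index), src_shape)
-- ===== SOURCE B (Python) =====
-- def _broadcast_pos(index, src_shape, out_shape):
--     same = src_shape == out_shape
--     pad = len(out_shape) - len(src_shape)
--     pos = 0
--     stride = 1
--     for i in reversed(range(len(src_shape))):
--         if same or src_shape[i] != 1:
--             pos += index[i + pad] * stride
--         stride *= src_shape[i]
--     return pos
-- ===== Notes on version B (the rewrite author's own statement) =====
-- stated objective: simpler
-- what changed: Replaces the three-pass strides-tuple + src_index-list + zip-dot decomposition with one fused reverse pass that accumulates pos and stride directly, guarding with `same or src_shape[i] != 1` to keep A's branch asymmetry.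
-- outside the precondition, e.g. on _broadcast_pos((), (2,), (2,)): A returns 0, B raises IndexError
import Mathlib
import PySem

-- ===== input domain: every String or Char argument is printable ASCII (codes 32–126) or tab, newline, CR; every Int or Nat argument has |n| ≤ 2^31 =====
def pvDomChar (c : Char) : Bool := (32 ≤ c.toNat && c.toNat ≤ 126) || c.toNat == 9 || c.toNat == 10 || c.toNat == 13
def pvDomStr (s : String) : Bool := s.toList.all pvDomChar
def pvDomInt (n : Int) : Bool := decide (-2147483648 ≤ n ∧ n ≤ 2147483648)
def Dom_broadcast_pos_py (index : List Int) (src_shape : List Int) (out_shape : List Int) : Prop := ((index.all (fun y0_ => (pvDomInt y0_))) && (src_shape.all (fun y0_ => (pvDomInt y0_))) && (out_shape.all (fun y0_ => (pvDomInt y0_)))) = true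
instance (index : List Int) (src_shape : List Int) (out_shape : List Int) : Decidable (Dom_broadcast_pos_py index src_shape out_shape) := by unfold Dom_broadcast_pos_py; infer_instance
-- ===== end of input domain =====

-- B fuses A's strides-tuple + src_index-list + zip-dot into one reverse accumulation pass (objective: simpler).

-- ===== PORT A =====
-- _strides: stride = 1; for size in reversed(shape): out.append(stride); stride *= size; return reversed(out)
def pyStridesA (shape : List Int) : List Int :=
  (shape.reverse.foldl (fun (st : Int × List Int) size => (st.1 * size, st.2 ++ [st.1])) (1, [])).2.reverse

-- _index_to_flat: sum(i * s for i, s in zip(index, _strides(shape)))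
def pyIndexToFlatA (index : List Int) (shape : List Int) : Int :=
  ((index.zip (pyStridesA shape)).map (fun p => p.1 * p.2)).sum

def broadcast_pos_py (index : List Int) (src_shape : List Int) (out_shape : List Int) : Int :=
  if src_shape = out_shape then pyIndexToFlatA index src_shape
  else
    let pad : Int := (out_shape.length : Int) - (src_shape.length : Int)
    -- index[i + pad] raises IndexError when out of range; Pre_ excludes that (default 0 unused inside Pre_)
    let src_index := (PySem.List.enumerate src_shape).foldl
      (fun acc p => acc ++ [if p.2 = 1 then 0 else PySem.List.pyGetD index (p.1 + pad) 0]) []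
    pyIndexToFlatA src_index src_shape

-- ===== PORT B =====
def broadcast_pos_py_alt (index : List Int) (src_shape : List Int) (out_shape : List Int) : Int :=
  let same := src_shape = out_shape
  let pad : Int := (out_shape.length : Int) - (src_shape.length : Int)
  -- for i in reversed(range(len(src_shape))): if same or src_shape[i] != 1: pos += index[i+pad]*stride; stride *= src_shape[i]
  -- src_shape[i] with 0 ≤ i < len is always in range (getD exact there); index[i+pad] as pyGetD, in range under Pre_
  ((List.range src_shape.length).reverse.foldl
    (fun (t : Int × Int) i =>
      ((if same ∨ src_shape.getD i 0 ≠ 1 then t.1 + PySem.List.pyGetD index ((i : Int) + pad) 0 * t.2 else t.1),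
       t.2 * src_shape.getD i 0)) (0, 1)).1

-- ===== PRECONDITION & SPEC =====
-- Pre_ excludes (a) unequal-shape inputs where some index[i+pad] access raises IndexError in A, and
-- (b) equal-shape inputs whose index is shorter than the shape, where A's zip silently truncates the
-- dot product while a natural indexing loop (B) raises IndexError.
def Pre_broadcast_pos_py (index : List Int) (src_shape : List Int) (out_shape : List Int) : Prop :=
  if src_shape = out_shape then src_shape.length ≤ index.length
  else ∀ i < src_shape.length, src_shape.getD i 0 = 1 ∨
    PySem.Raise.InRange index.length ((i : Int) + ((out_shape.length : Int) - (src_shape.length : Int)))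
instance (index : List Int) (src_shape : List Int) (out_shape : List Int) : Decidable (Pre_broadcast_pos_py index src_shape out_shape) := by unfold Pre_broadcast_pos_py; infer_instance

def pvWitness_broadcast_pos_py : List Int × List Int × List Int := ([1, 2], [2, 3], [2, 3])

def Spec_broadcast_pos_py (index : List Int) (src_shape : List Int) (out_shape : List Int) (out : Int) : Prop := out = broadcast_pos_py_alt index src_shape out_shape
instance (index : List Int) (src_shape : List Int) (out_shape : List Int) (out : Int) : Decidable (Spec_broadcast_pos_py index src_shape out_shape out) := by unfold Spec_broadcast_pos_py; infer_instance

-- ===== CLAIM (what is proved, stated in full; the proofs are below) =====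
def Claim_equal_broadcast_pos_py : Prop := ∀ (index : List Int) (src_shape : List Int) (out_shape : List Int), Dom_broadcast_pos_py index src_shape out_shape → Pre_broadcast_pos_py index src_shape out_shape → Spec_broadcast_pos_py index src_shape out_shape (broadcast_pos_py index src_shape out_shape)

-- ===== LEMMAS AND PROOFS =====

-- dot product, the common value both ports compute
def mdot : List Int → List Int → Int
  | x :: xs, y :: ys => x * y + mdot xs ys
  | _, _ => 0

-- the strides list built from accumulator s
def stridesFrom (s : Int) : List Int → List Int
  | [] => []
  | x :: xs => s :: stridesFrom (s * x) xs

theorem sum_zip_mul (xs : List Int) : ∀ ys : List Int,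
    ((xs.zip ys).map (fun p : Int × Int => p.1 * p.2)).sum = mdot xs ys := by
  induction xs with
  | nil => intro ys; simp [mdot]
  | cons x xs ih =>
    intro ys
    cases ys with
    | nil => simp [mdot]
    | cons y ys => simp [mdot, ih ys]

theorem strides_foldl (l : List Int) : ∀ (s : Int) (acc : List Int),
    l.foldl (fun (st : Int × List Int) size => (st.1 * size, st.2 ++ [st.1])) (s, acc)
      = (s * l.prod, acc ++ stridesFrom s l) := by
  induction l with
  | nil => intro s acc; simp [stridesFrom]
  | cons x xs ih =>
    intro s acc
    simp only [List.foldl_cons, ih (s * x) (acc ++ [s]), List.prod_cons, stridesFrom,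
      List.append_assoc, List.singleton_append, mul_assoc]

theorem pyStridesA_eq (l : List Int) : pyStridesA l = (stridesFrom 1 l.reverse).reverse := by
  unfold pyStridesA
  rw [strides_foldl]
  simp

theorem stridesFrom_mul (l : List Int) : ∀ s t : Int,
    stridesFrom (t * s) l = (stridesFrom s l).map (fun y => t * y) := by
  induction l with
  | nil => intro s t; simp [stridesFrom]
  | cons x xs ih =>
    intro s t
    simp only [stridesFrom, List.map_cons, mul_assoc, ih (s * x) t]

theorem length_stridesFrom (l : List Int) : ∀ s : Int, (stridesFrom s l).length = l.length := by
  induction l with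
  | nil => intro s; simp [stridesFrom]
  | cons x xs ih => intro s; simp [stridesFrom, ih]

theorem length_pyStridesA (l : List Int) : (pyStridesA l).length = l.length := by
  simp [pyStridesA_eq, length_stridesFrom]

theorem pyStridesA_concat (ys : List Int) (z : Int) :
    pyStridesA (ys ++ [z]) = (pyStridesA ys).map (fun y => z * y) ++ [1] := by
  have h : stridesFrom z ys.reverse = (stridesFrom 1 ys.reverse).map (fun y => z * y) := by
    have := stridesFrom_mul ys.reverse 1 z
    simpa using this
  simp [pyStridesA_eq, stridesFrom, h, ← List.map_reverse]

theorem mdot_nil_right (xs : List Int) : mdot xs [] = 0 := by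
  cases xs <;> simp [mdot]

theorem mdot_concat (xs : List Int) : ∀ (ys : List Int) (a b : Int), xs.length = ys.length →
    mdot (xs ++ [a]) (ys ++ [b]) = mdot xs ys + a * b := by
  induction xs with
  | nil =>
    intro ys a b h
    cases ys with
    | nil => simp [mdot]
    | cons y ys => simp at h
  | cons x xs ih =>
    intro ys a b h
    cases ys with
    | nil => simp at h
    | cons y ys =>
      simp only [List.length_cons, Nat.add_right_cancel_iff] at h
      simp only [List.cons_append, mdot, ih ys a b h]
      ring

theorem mdot_map_right (xs : List Int) : ∀ (ys : List Int) (z : Int),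
    mdot xs (ys.map (fun y => z * y)) = z * mdot xs ys := by
  induction xs with
  | nil => intro ys z; simp [mdot]
  | cons x xs ih =>
    intro ys z
    cases ys with
    | nil => simp [mdot]
    | cons y ys =>
      simp only [List.map_cons, mdot, ih ys z]
      ring

-- A's zip dot depends only on the first |ys| entries of xs
theorem mdot_getD (ys : List Int) : ∀ xs : List Int, ys.length ≤ xs.length →
    mdot xs ys = mdot ((List.range ys.length).map (fun i => xs.getD i 0)) ys := by
  induction ys with
  | nil => intro xs h; simp [mdot_nil_right]
  | cons y ys ih =>
    intro xs h
    cases xs with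
    | nil => simp at h
    | cons x xs =>
      simp only [List.length_cons, Nat.add_le_add_iff_right] at h
      simp only [List.length_cons, List.range_succ_eq_map, List.map_cons, List.map_map, mdot,
        List.getD_cons_zero]
      have : (List.range ys.length).map ((fun i => (x :: xs).getD i 0) ∘ Nat.succ)
           = (List.range ys.length).map (fun i => xs.getD i 0) := by
        refine List.map_congr_left ?_
        intro i _
        simp
      rw [this, ih xs h]

-- the fused reverse pass computes the dot product against the strides and the running product
theorem fold_key (c : Nat → Int) (shape : List Int) : ∀ p s : Int,
    (List.range shape.length).reverse.foldl
      (fun (t : Int × Int) i => (t.1 + c i * t.2, t.2 * shape.getD i 0)) (p, s)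
    = (p + s * mdot ((List.range shape.length).map c) (pyStridesA shape), s * shape.prod) := by
  induction shape using List.reverseRecOn with
  | nil => intro p s; simp [pyStridesA, mdot]
  | append_singleton ys z ih =>
    intro p s
    have hlen : (ys ++ [z]).length = ys.length + 1 := by simp
    have hgd : (ys ++ [z]).getD ys.length 0 = z := by
      simp [List.getD]
    have hrange : (List.range (ys.length + 1)).reverse = ys.length :: (List.range ys.length).reverse := by
      simp [List.range_succ]
    have hcongr : (List.range ys.length).reverse.foldl
        (fun (t : Int × Int) i => (t.1 + c i * t.2, t.2 * (ys ++ [z]).getD i 0)) (p + c ys.length * s, s * z)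
      = (List.range ys.length).reverse.foldl
        (fun (t : Int × Int) i => (t.1 + c i * t.2, t.2 * ys.getD i 0)) (p + c ys.length * s, s * z) := by
      apply PySem.List.foldl_congr_mem
      intro acc i hi
      have hi' : i < ys.length := by
        have := List.mem_reverse.mp hi
        exact List.mem_range.mp this
      have : (ys ++ [z]).getD i 0 = ys.getD i 0 := by
        simp [List.getD, List.getElem?_append_left hi']
      rw [this]
    rw [hlen, hrange, List.foldl_cons]
    simp only [hgd]
    rw [hcongr, ih (p + c ys.length * s) (s * z)]
    have hmap : (List.range (ys.length + 1)).map c = (List.range ys.length).map c ++ [c ys.length] := by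
      simp [List.range_succ]
    have hlen2 : ((List.range ys.length).map c).length = ((pyStridesA ys).map (fun y => z * y)).length := by
      simp [length_pyStridesA]
    rw [hmap, pyStridesA_concat, mdot_concat _ _ _ _ hlen2, mdot_map_right]
    simp only [Prod.mk.injEq, List.prod_append, List.prod_cons, List.prod_nil]
    constructor <;> ring

-- src_index built by append-in-a-loop over enumerate, as a map over range
theorem enumerate_map_getD (f : Int × Int → Int) (l : List Int) : ∀ s : Int,
    (PySem.List.enumerate l s).map f
      = (List.range l.length).map (fun (i : Nat) => f (s + (i : Int), l.getD i 0)) := by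
  induction l with
  | nil => intro s; simp [PySem.List.enumerate_nil]
  | cons x xs ih =>
    intro s
    rw [PySem.List.enumerate_cons, List.map_cons, ih (s + 1)]
    simp only [List.length_cons, List.range_succ_eq_map, List.map_cons, List.map_map,
      List.getD_cons_zero, Nat.cast_zero, add_zero]
    congr 1
    refine List.map_congr_left ?_
    intro i _
    simp only [Function.comp_apply, List.getD_cons_succ]
    congr 2
    push_cast
    ring

-- ===== VERDICT (by name: the statement is the Claim_ definition above) =====
theorem broadcast_pos_py_spec : Claim_equal_broadcast_pos_py := by
  intro index src_shape out_shape _ hpre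
  unfold Spec_broadcast_pos_py broadcast_pos_py broadcast_pos_py_alt
  by_cases hsame : src_shape = out_shape
  · -- equal shapes: pad = 0, every dim contributes index[i]*stride
    subst hsame
    have hlen : src_shape.length ≤ index.length := by
      unfold Pre_broadcast_pos_py at hpre
      simpa using hpre
    simp only [true_or, if_true, sub_self, add_zero,
      PySem.List.pyGetD_natCast, pyIndexToFlatA]
    rw [sum_zip_mul, mdot_getD _ index (by simpa [length_pyStridesA] using hlen),
      fold_key (fun j => index.getD j 0) src_shape 0 1]
    simp [length_pyStridesA]
  · -- broadcast: size-1 dims contribute 0, others index[i+pad]*stride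
    simp only [if_neg hsame]
    rw [PySem.List.foldl_append_singleton_eq_map, pyIndexToFlatA, sum_zip_mul,
      enumerate_map_getD]
    have hcongr : (List.range src_shape.length).reverse.foldl
        (fun (t : Int × Int) i =>
          ((if (src_shape = out_shape) ∨ src_shape.getD i 0 ≠ 1 then
              t.1 + PySem.List.pyGetD index ((i : Int) + ((out_shape.length : Int) - (src_shape.length : Int))) 0 * t.2
            else t.1),
           t.2 * src_shape.getD i 0)) ((0 : Int), (1 : Int))
      = (List.range src_shape.length).reverse.foldl
        (fun (t : Int × Int) i =>
          (t.1 + (fun j => if src_shape.getD j 0 = 1 then 0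
              else PySem.List.pyGetD index ((j : Int) + ((out_shape.length : Int) - (src_shape.length : Int))) 0) i * t.2,
           t.2 * src_shape.getD i 0)) (0, 1) := by
      apply PySem.List.foldl_congr_mem
      intro acc i _
      by_cases h1 : src_shape.getD i 0 = 1
      all_goals rw [List.getD_eq_getElem?_getD] at h1
      · simp [h1, hsame]
      · simp [h1, hsame]
    rw [hcongr, fold_key (fun j => if src_shape.getD j 0 = 1 then 0
        else PySem.List.pyGetD index ((j : Int) + ((out_shape.length : Int) - (src_shape.length : Int))) 0) src_shape 0 1]
    simp only [zero_add, one_mul, List.nil_append]
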